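-- pv_equiv track=rewrite | github.com/wingjammer1993/Misc | Precursor.py | create_master_list
-- ===== SOURCE A (Python) =====
-- def create_master_list(new_list, new_ordering_list):
--     order_list = []
--     for sublist in new_list:
--         for item in sublist:
--             if item not in order_list:
--                 order_list.append(item)
--
--     length = len(new_ordering_list)
--     order_weights = [0]*length
--
--     for item in new_ordering_list:
--         for sublist in new_list:
--             if item in sublist:
--                 count  = sublist.index(item)
--                 object = sublist[0]
--                 if 1 == count:
--                     if object not in new_ordering_list:
--                         first_term = 0
--                     else:
--                         first_term = order_list.index(object) + 1
--                     weight =  first_term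
--                 else:
--                     weight = 0
--                 item_index = new_ordering_list.index(item)
--                 order_weights[item_index] = order_weights[item_index] + weight
--
--     pass_list = []
--     for elem in new_ordering_list:
--         minumum_val = min(order_weights)
--         x = order_weights[new_ordering_list.index(elem)]
--         if minumum_val == x:
--             pass_list.append(elem)
--
--     return pass_list
-- ===== SOURCE B (Python) =====
-- def create_master_list(new_list, new_ordering_list):
--     if not new_ordering_list:
--         return []
--
--     # first occurrence index of each ordering element
--     first_idx = {}
--     i = 0
--     for e in new_ordering_list:
--         if e not in first_idx:
--             first_idx[e] = i
--         i += 1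
--
--     # multiplicity of each ordering element
--     cnt = {}
--     for e in new_ordering_list:
--         cnt[e] = cnt.get(e, 0) + 1
--
--     # appearance-order rank of every item seen in new_list
--     pos = {}
--     for sub in new_list:
--         for it in sub:
--             if it not in pos:
--                 pos[it] = len(pos)
--
--     # one pass over new_list: a sublist contributes to the element at its index 1
--     weights = [0] * len(new_ordering_list)
--     for sub in new_list:
--         if len(sub) >= 2:
--             s0, s1 = sub[0], sub[1]
--             if s1 != s0 and s1 in first_idx:
--                 term = pos[s0] + 1 if s0 in first_idx else 0
--                 weights[first_idx[s1]] += term * cnt[s1]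
--
--     m = min(weights)
--     return [e for e in new_ordering_list if weights[first_idx[e]] == m]
-- ===== Notes on version B (the rewrite author's own statement) =====
-- stated objective: faster
-- what changed: Replaces A's nested loops over new_ordering_list x new_list with repeated linear .index/.in scans by dicts built once (first-occurrence index, multiplicity, appearance rank) and a single pass over new_list that credits each sublist's index-1 element directly.
import Mathlib
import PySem

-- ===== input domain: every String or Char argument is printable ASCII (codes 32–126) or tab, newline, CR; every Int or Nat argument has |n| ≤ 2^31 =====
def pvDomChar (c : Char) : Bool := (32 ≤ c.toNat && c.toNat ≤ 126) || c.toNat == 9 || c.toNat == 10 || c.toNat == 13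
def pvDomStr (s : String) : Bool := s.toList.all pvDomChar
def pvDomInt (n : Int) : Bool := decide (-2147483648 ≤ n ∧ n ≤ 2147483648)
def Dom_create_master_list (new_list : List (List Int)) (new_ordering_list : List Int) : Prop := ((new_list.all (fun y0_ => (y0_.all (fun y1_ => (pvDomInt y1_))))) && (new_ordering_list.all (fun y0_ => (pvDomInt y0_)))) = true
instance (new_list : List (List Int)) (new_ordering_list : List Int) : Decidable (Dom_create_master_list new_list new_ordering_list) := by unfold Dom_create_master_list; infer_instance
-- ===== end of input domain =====

-- B builds first-index/count/rank dicts once and makes one pass over new_list instead of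
-- A's nested scans with repeated .index lookups (objective: faster).


-- ===== PORT A =====
-- A's first loop pair: order_list, the distinct items of new_list in appearance order
def aOrderList (new_list : List (List Int)) : List Int :=
  new_list.foldl (fun ol sub =>
    sub.foldl (fun ol item => if item ∈ ol then ol else ol ++ [item]) ol) []

-- the body of A's inner 'for sublist in new_list' loop
def aInner (nol ol : List Int) (item : Int) (ow : List Int) (sub : List Int) : List Int :=
  if item ∈ sub then
    let count : Nat := (PySem.List.index? sub item).getD 0
    let obj : Int := (PySem.List.pyGet? sub 0).getD 0
    let weight : Int :=
      if count = 1 then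
        if obj ∉ nol then 0 else ((PySem.List.index? ol obj).getD 0 : Int) + 1
      else 0
    let item_index : Nat := (PySem.List.index? nol item).getD 0
    ow.set item_index (ow.getD item_index 0 + weight)
  else ow

def create_master_list (new_list : List (List Int)) (new_ordering_list : List Int) : List Int :=
  let order_list : List Int := aOrderList new_list
  let order_weights : List Int :=
    new_ordering_list.foldl
      (fun ow item => new_list.foldl (aInner new_ordering_list order_list item) ow)
      (List.replicate new_ordering_list.length 0)
  new_ordering_list.foldl (fun pl elem =>
    let minimum_val : Int := (PySem.List.min? order_weights (fun x => x)).getD 0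
    let x : Int := order_weights.getD ((PySem.List.index? new_ordering_list elem).getD 0) 0
    if minimum_val = x then pl ++ [elem] else pl) []

-- ===== PORT B =====
-- first occurrence index of each ordering element (Source B's first_idx loop with counter i)
def bFirstIdx (nol : List Int) : PySem.Dict Int Nat :=
  (nol.foldl (fun (p : PySem.Dict Int Nat × Nat) e =>
    (if p.1.contains e then p.1 else p.1.insert e p.2, p.2 + 1)) (PySem.Dict.empty, 0)).1

-- multiplicity of each ordering element (Source B's cnt loop)
def bCnt (nol : List Int) : PySem.Dict Int Int :=
  nol.foldl (fun d e => d.insert e (d.getD e 0 + 1)) PySem.Dict.empty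

-- appearance-order rank of every item of new_list (Source B's pos loop)
def bPos (new_list : List (List Int)) : PySem.Dict Int Nat :=
  new_list.foldl (fun d sub =>
    sub.foldl (fun d it => if d.contains it then d else d.insert it d.size) d)
    PySem.Dict.empty

-- the body of Source B's single pass over new_list
def bStep (fi pos : PySem.Dict Int Nat) (cnt : PySem.Dict Int Int)
    (w : List Int) (sub : List Int) : List Int :=
  match sub with
  | s0 :: s1 :: _ =>
    if s1 ≠ s0 ∧ fi.contains s1 = true then
      let term : Int := if fi.contains s0 then (pos.getD s0 0 : Int) + 1 else 0
      let j : Nat := fi.getD s1 0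
      w.set j (w.getD j 0 + term * cnt.getD s1 0)
    else w
  | _ => w

def create_master_list_alt (new_list : List (List Int)) (new_ordering_list : List Int) : List Int :=
  if new_ordering_list = [] then [] else
  let first_idx := bFirstIdx new_ordering_list
  let cnt := bCnt new_ordering_list
  let pos := bPos new_list
  let weights : List Int :=
    new_list.foldl (bStep first_idx pos cnt) (List.replicate new_ordering_list.length 0)
  let m : Int := (PySem.List.min? weights (fun x => x)).getD 0
  new_ordering_list.filter (fun e => decide (weights.getD (first_idx.getD e 0) 0 = m))

-- ===== PRECONDITION & SPEC =====
def Spec_create_master_list (new_list : List (List Int)) (new_ordering_list : List Int) (out : List Int) : Prop := out = create_master_list_alt new_list new_ordering_list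
instance (new_list : List (List Int)) (new_ordering_list : List Int) (out : List Int) : Decidable (Spec_create_master_list new_list new_ordering_list out) := by unfold Spec_create_master_list; infer_instance

-- ===== CLAIM (what is proved, stated in full; the proofs are below) =====
def Claim_equal_create_master_list : Prop := ∀ (new_list : List (List Int)) (new_ordering_list : List Int), Dom_create_master_list new_list new_ordering_list → Spec_create_master_list new_list new_ordering_list (create_master_list new_list new_ordering_list)

-- ===== LEMMAS AND PROOFS =====

-- the weight A computes for (item, sub) when item ∈ sub (0 otherwise)
def contribA (nol ol : List Int) (item : Int) (sub : List Int) : Int :=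
  if item ∈ sub then
    (if (PySem.List.index? sub item).getD 0 = 1 then
      (if ((PySem.List.pyGet? sub 0).getD 0) ∉ nol then 0
       else ((PySem.List.index? ol ((PySem.List.pyGet? sub 0).getD 0)).getD 0 : Int) + 1)
     else 0)
  else 0

-- the amount bStep adds at position k for one sublist
def contribB (fi pos : PySem.Dict Int Nat) (cnt : PySem.Dict Int Int)
    (sub : List Int) (k : Nat) : Int :=
  match sub with
  | s0 :: s1 :: _ =>
    if s1 ≠ s0 ∧ fi.contains s1 = true ∧ k = fi.getD s1 0 then
      (if fi.contains s0 then (pos.getD s0 0 : Int) + 1 else 0) * cnt.getD s1 0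
    else 0
  | _ => 0

-- index? bound: a found index is below the length
theorem index?_getD_lt (l : List Int) (x : Int) (hx : x ∈ l) :
    (PySem.List.index? l x).getD 0 < l.length := by
  rcases Option.isSome_iff_exists.1 ((PySem.List.index?_isSome_iff l x).2 hx) with ⟨k, hk⟩
  rcases PySem.List.getElem_of_index?_eq_some hk with ⟨hlt, _, _⟩
  rw [hk]
  simpa using hlt

theorem aInner_length (nol ol : List Int) (item : Int) (nl : List (List Int)) (ow : List Int) :
    (nl.foldl (aInner nol ol item) ow).length = ow.length := by
  induction nl generalizing ow with
  | nil => rfl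
  | cons sub rest ih =>
      simp only [List.foldl_cons]
      rw [ih]
      unfold aInner
      split <;> simp

theorem aInner_foldl (nol ol : List Int) (item : Int) (nl : List (List Int)) (ow : List Int)
    (k : Nat) (hj : (PySem.List.index? nol item).getD 0 < ow.length) :
    (nl.foldl (aInner nol ol item) ow).getD k 0
      = ow.getD k 0 + (if k = (PySem.List.index? nol item).getD 0
          then (nl.map (contribA nol ol item)).sum else 0) := by
  induction nl generalizing ow with
  | nil =>
      simp
  | cons sub rest ih =>
      simp only [List.foldl_cons, List.map_cons, List.sum_cons]
      by_cases hmem : item ∈ sub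
      · have hset : aInner nol ol item ow sub
            = ow.set ((PySem.List.index? nol item).getD 0)
                (ow.getD ((PySem.List.index? nol item).getD 0) 0 + contribA nol ol item sub) := by
          simp [aInner, contribA, hmem]
        rw [hset, ih _ (by simpa using hj)]
        set j := (PySem.List.index? nol item).getD 0 with hjdef
        by_cases hk : k = j
        · subst hk
          rw [List.getD_eq_getElem _ _ (by simpa using hj), List.getElem_set_self]
          rw [List.getD_eq_getElem _ _ hj]
          simp only [if_true]
          ring
        · simp only [if_neg hk]
          rcases Nat.lt_or_ge k ow.length with hk2 | hk2
          · rw [List.getD_eq_getElem _ _ (by simpa using hk2),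
              List.getElem_set_ne (by omega), List.getD_eq_getElem _ _ hk2]
          · rw [List.getD_eq_default _ _ (by simpa using hk2), List.getD_eq_default _ _ hk2]
      · have hskip : aInner nol ol item ow sub = ow := by simp [aInner, hmem]
        have hc : contribA nol ol item sub = 0 := by simp [contribA, hmem]
        rw [hskip, ih _ hj, hc]
        split <;> ring

theorem aOuter_foldl (nol ol : List Int) (nl : List (List Int)) (l : List Int) (ow : List Int)
    (hmem : ∀ x ∈ l, x ∈ nol) (hlen : ow.length = nol.length) (k : Nat) :
    (l.foldl (fun ow item => nl.foldl (aInner nol ol item) ow) ow).getD k 0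
      = ow.getD k 0 + (l.map (fun item => if k = (PySem.List.index? nol item).getD 0
          then (nl.map (contribA nol ol item)).sum else 0)).sum := by
  induction l generalizing ow with
  | nil => simp
  | cons x rest ih =>
      simp only [List.foldl_cons, List.map_cons, List.sum_cons]
      have hx : x ∈ nol := hmem x (by simp)
      have hj : (PySem.List.index? nol x).getD 0 < ow.length := by
        rw [hlen]; exact index?_getD_lt nol x hx
      rw [ih _ (fun y hy => hmem y (by simp [hy]))
          (by rw [aInner_length]; exact hlen)]
      rw [aInner_foldl nol ol x nl ow k hj]
      ring

theorem aOuter_length (nol ol : List Int) (nl : List (List Int)) (l : List Int) (ow : List Int) :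
    (l.foldl (fun ow item => nl.foldl (aInner nol ol item) ow) ow).length = ow.length := by
  induction l generalizing ow with
  | nil => rfl
  | cons x rest ih => simp only [List.foldl_cons]; rw [ih, aInner_length]

theorem bStep_length (fi pos : PySem.Dict Int Nat) (cnt : PySem.Dict Int Int)
    (nl : List (List Int)) (w : List Int) :
    (nl.foldl (bStep fi pos cnt) w).length = w.length := by
  induction nl generalizing w with
  | nil => rfl
  | cons sub rest ih =>
      simp only [List.foldl_cons]
      rw [ih]
      unfold bStep
      split <;> (try split) <;> simp

theorem bStep_length_one (fi pos : PySem.Dict Int Nat) (cnt : PySem.Dict Int Int)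
    (w : List Int) (sub : List Int) : (bStep fi pos cnt w sub).length = w.length := by
  unfold bStep
  split <;> (try split) <;> simp

theorem bStep_foldl (fi pos : PySem.Dict Int Nat) (cnt : PySem.Dict Int Int)
    (nl : List (List Int)) (w : List Int) (k : Nat)
    (hfi : ∀ s, fi.contains s = true → fi.getD s 0 < w.length) :
    (nl.foldl (bStep fi pos cnt) w).getD k 0
      = w.getD k 0 + (nl.map (fun sub => contribB fi pos cnt sub k)).sum := by
  induction nl generalizing w with
  | nil => simp
  | cons sub rest ih =>
      simp only [List.foldl_cons, List.map_cons, List.sum_cons]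
      rw [ih _ (by intro s hs; rw [bStep_length_one]; exact hfi s hs)]
      have hstep : (bStep fi pos cnt w sub).getD k 0 = w.getD k 0 + contribB fi pos cnt sub k := by
        match sub with
        | [] => simp [bStep, contribB]
        | [s0] => simp [bStep, contribB]
        | s0 :: s1 :: t =>
            simp only [bStep, contribB]
            by_cases hg : s1 ≠ s0 ∧ fi.contains s1 = true
            · have hlt : fi.getD s1 0 < w.length := hfi s1 hg.2
              simp only [if_pos hg]
              by_cases hk : k = fi.getD s1 0
              · subst hk
                rw [List.getD_eq_getElem _ _ (by simpa using hlt), List.getElem_set_self,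
                  List.getD_eq_getElem _ _ hlt]
                simp [hg]
              · have : ¬ (s1 ≠ s0 ∧ fi.contains s1 = true ∧ k = fi.getD s1 0) := by
                  intro h; exact hk h.2.2
                rw [if_neg this]
                rcases Nat.lt_or_ge k w.length with hk2 | hk2
                · rw [List.getD_eq_getElem _ _ (by simpa using hk2),
                    List.getElem_set_ne (by omega), List.getD_eq_getElem _ _ hk2]
                  ring
                · rw [List.getD_eq_default _ _ (by simpa using hk2),
                    List.getD_eq_default _ _ hk2]
                  ring
            · have : ¬ (s1 ≠ s0 ∧ fi.contains s1 = true ∧ k = fi.getD s1 0) := by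
                intro h; exact hg ⟨h.1, h.2.1⟩
              rw [if_neg hg, if_neg this]
              ring
      rw [hstep]
      ring

theorem fiFold (l : List Int) (x : Int) :
    ∀ (d : PySem.Dict Int Nat) (i : Nat),
      ((l.foldl (fun (p : PySem.Dict Int Nat × Nat) e =>
          (if p.1.contains e then p.1 else p.1.insert e p.2, p.2 + 1)) (d, i)).1).get? x
      = if (d.get? x).isSome then d.get? x
        else (PySem.List.index? l x).map (· + i) := by
  induction l with
  | nil =>
      intro d i
      cases h : d.get? x <;> simp [h, PySem.List.index?_eq_idxOf?]
  | cons e t ih =>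
      intro d i
      simp only [List.foldl_cons]
      by_cases hce : d.contains e = true
      · simp only [hce, if_true]
        rw [ih d (i + 1)]
        have hsome : (d.get? e).isSome := by
          rw [PySem.Dict.contains_eq_isSome_get?] at hce; exact hce
        cases h : d.get? x with
        | some v => simp [h]
        | none =>
            have hne : e ≠ x := by rintro rfl; rw [h] at hsome; simp at hsome
            simp only [h, Option.isSome_none, Bool.false_eq_true, if_false]
            rw [PySem.List.index?_cons_of_ne t hne, Option.map_map]
            congr 1
            funext n
            simp only [Function.comp_apply]
            omega
      · rw [Bool.not_eq_true] at hce
        simp only [hce, Bool.false_eq_true, if_false]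
        rw [ih (d.insert e i) (i + 1)]
        have hnone : d.get? e = none := by
          rw [PySem.Dict.contains_eq_isSome_get?] at hce
          cases h : d.get? e
          · rfl
          · rw [h] at hce; simp at hce
        by_cases hx : x = e
        · subst hx
          rw [PySem.Dict.get?_insert_self]
          rw [PySem.List.index?_cons_self]
          simp [hnone]
        · rw [PySem.Dict.get?_insert_of_ne d i hx]
          cases h : d.get? x with
          | some v => simp [h]
          | none =>
              have hne : e ≠ x := fun hh => hx hh.symm
              simp only [h, Option.isSome_none, Bool.false_eq_true, if_false]
              rw [PySem.List.index?_cons_of_ne t hne, Option.map_map]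
              congr 1
              funext n
              simp only [Function.comp_apply]
              omega

theorem bFirstIdx_get? (nol : List Int) (x : Int) :
    (bFirstIdx nol).get? x = PySem.List.index? nol x := by
  unfold bFirstIdx
  rw [fiFold]
  simp

theorem bFirstIdx_contains (nol : List Int) (x : Int) :
    (bFirstIdx nol).contains x = true ↔ x ∈ nol := by
  rw [PySem.Dict.contains_eq_isSome_get?, bFirstIdx_get?]
  simp

theorem bFirstIdx_getD (nol : List Int) (x : Int) :
    (bFirstIdx nol).getD x 0 = (PySem.List.index? nol x).getD 0 := by
  rw [PySem.Dict.getD_eq_get?_getD, bFirstIdx_get?]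

theorem bCnt_getD (nol : List Int) (x : Int) :
    (bCnt nol).getD x 0 = (nol.count x : Int) := by
  unfold bCnt
  rw [PySem.Dict.getD_foldl_insert_add_one]
  simp

theorem posSub (sub : List Int) :
    ∀ (d : PySem.Dict Int Nat) (ol : List Int),
      (∀ x, d.get? x = PySem.List.index? ol x) → d.size = ol.length →
      (∀ x, (sub.foldl (fun d it => if d.contains it then d else d.insert it d.size) d).get? x
          = PySem.List.index?
              (sub.foldl (fun ol item => if item ∈ ol then ol else ol ++ [item]) ol) x)
      ∧ (sub.foldl (fun d it => if d.contains it then d else d.insert it d.size) d).size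
          = (sub.foldl (fun ol item => if item ∈ ol then ol else ol ++ [item]) ol).length := by
  induction sub with
  | nil => intro d ol h hs; exact ⟨h, hs⟩
  | cons it t ih =>
      intro d ol h hs
      simp only [List.foldl_cons]
      by_cases hm : it ∈ ol
      · have hc : d.contains it = true := by
          rw [PySem.Dict.contains_eq_isSome_get?, h it]
          exact (PySem.List.index?_isSome_iff ol it).2 hm
        simp only [hc, if_true, hm]
        exact ih d ol h hs
      · have hc : d.contains it = false := by
          rw [PySem.Dict.contains_eq_isSome_get?, h it]
          simp [PySem.List.index?_eq_none_iff, hm]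
        simp only [hc, Bool.false_eq_true, if_false, hm]
        refine ih (d.insert it d.size) (ol ++ [it]) ?_ ?_
        · intro y
          rw [PySem.Dict.get?_insert]
          by_cases hy : y = it
          · subst hy
            rw [if_pos rfl, PySem.List.index?_append_singleton_self ol y hm, hs]
          · rw [if_neg hy, h y]
            by_cases hyo : y ∈ ol
            · rw [PySem.List.index?_append_of_mem [it] hyo]
            · rw [(PySem.List.index?_eq_none_iff ol y).2 hyo,
                (PySem.List.index?_eq_none_iff (ol ++ [it]) y).2 (by simp [hyo, hy])]
        · rw [PySem.Dict.size_insert, if_neg (by simp [hc]), hs]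
          simp

theorem posFold (nl : List (List Int)) :
    ∀ (d : PySem.Dict Int Nat) (ol : List Int),
      (∀ x, d.get? x = PySem.List.index? ol x) → d.size = ol.length →
      (∀ x, (nl.foldl (fun d sub =>
            sub.foldl (fun d it => if d.contains it then d else d.insert it d.size) d) d).get? x
          = PySem.List.index?
              (nl.foldl (fun ol sub =>
                sub.foldl (fun ol item => if item ∈ ol then ol else ol ++ [item]) ol) ol) x)
      ∧ (nl.foldl (fun d sub =>
            sub.foldl (fun d it => if d.contains it then d else d.insert it d.size) d) d).size
          = (nl.foldl (fun ol sub =>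
              sub.foldl (fun ol item => if item ∈ ol then ol else ol ++ [item]) ol) ol).length := by
  induction nl with
  | nil => intro d ol h hs; exact ⟨h, hs⟩
  | cons sub rest ih =>
      intro d ol h hs
      simp only [List.foldl_cons]
      rcases posSub sub d ol h hs with ⟨h', hs'⟩
      exact ih _ _ h' hs'

theorem bPos_get? (nl : List (List Int)) (x : Int) :
    (bPos nl).get? x = PySem.List.index? (aOrderList nl) x := by
  unfold bPos aOrderList
  exact (posFold nl PySem.Dict.empty [] (fun y => by simp [PySem.List.index?_eq_idxOf?]) (by simp)).1 x

theorem bPos_getD (nl : List (List Int)) (x : Int) :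
    ((bPos nl).getD x 0 : Int) = ((PySem.List.index? (aOrderList nl) x).getD 0 : Int) := by
  rw [PySem.Dict.getD_eq_get?_getD, bPos_get?]

theorem sum_map_swap {α β : Type} (l : List α) (m : List β) (f : α → β → Int) :
    (l.map (fun x => (m.map (f x)).sum)).sum
      = (m.map (fun y => (l.map (fun x => f x y)).sum)).sum := by
  induction l with
  | nil => simp
  | cons x rest ih =>
      simp only [List.map_cons, List.sum_cons, ih]
      rw [← PySem.List.sum_map_add_int]

theorem sum_map_ite_eq (l : List Int) (a : Int) (c : Int) :
    (l.map (fun x => if x = a then c else 0)).sum = (l.count a : Int) * c := by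
  induction l with
  | nil => simp
  | cons x rest ih =>
      by_cases hx : x = a <;> simp [hx, ih, add_mul, add_comm]

theorem contribA_cons2 (nol ol : List Int) (item s0 s1 : Int) (t : List Int) :
    contribA nol ol item (s0 :: s1 :: t)
      = if item = s1 ∧ s1 ≠ s0 then
          (if s0 ∉ nol then 0 else ((PySem.List.index? ol s0).getD 0 : Int) + 1)
        else 0 := by
  unfold contribA
  by_cases h0 : item = s0
  · subst h0
    have hg : (PySem.List.index? (item :: s1 :: t) item).getD 0 = 0 := by
      rw [PySem.List.index?_cons_self]
      rfl
    rw [if_pos (show item ∈ item :: s1 :: t by simp)]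
    simp only [hg]
    rw [if_neg (by decide), if_neg (by rintro ⟨rfl, hb⟩; exact hb rfl)]
  · by_cases h1 : item = s1
    · subst h1
      have hne : s0 ≠ item := fun hh => h0 hh.symm
      have hg : (PySem.List.index? (s0 :: item :: t) item).getD 0 = 1 := by
        rw [PySem.List.index?_cons_of_ne (item :: t) hne, PySem.List.index?_cons_self]
        rfl
      rw [if_pos (show item ∈ s0 :: item :: t by simp)]
      simp only [hg, if_true, true_and, PySem.List.pyGet?_zero_cons, Option.getD_some]
      rw [if_pos h0]
    · by_cases hm : item ∈ s0 :: s1 :: t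
      · have hmt : item ∈ t := by simpa [h0, h1] using hm
        have h2 : s0 ≠ item := fun hh => h0 hh.symm
        have h3 : s1 ≠ item := fun hh => h1 hh.symm
        rcases Option.isSome_iff_exists.1 ((PySem.List.index?_isSome_iff t item).2 hmt)
          with ⟨n, hn⟩
        have hg : (PySem.List.index? (s0 :: s1 :: t) item).getD 0 = n + 1 + 1 := by
          rw [PySem.List.index?_cons_of_ne (s1 :: t) h2,
            PySem.List.index?_cons_of_ne t h3, hn]
          rfl
        rw [if_pos hm]
        simp only [hg]
        rw [if_neg (by omega), if_neg (by rintro ⟨rfl, -⟩; exact h1 rfl)]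
      · rw [if_neg hm, if_neg (by rintro ⟨rfl, -⟩; exact hm (by simp))]

theorem contribB_cons2 (fi pos : PySem.Dict Int Nat) (cnt : PySem.Dict Int Int)
    (s0 s1 : Int) (t : List Int) (k : Nat) :
    contribB fi pos cnt (s0 :: s1 :: t) k
      = if s1 ≠ s0 ∧ fi.contains s1 = true ∧ k = fi.getD s1 0 then
          (if fi.contains s0 then (pos.getD s0 0 : Int) + 1 else 0) * cnt.getD s1 0
        else 0 := rfl

theorem per_sub (nl : List (List Int)) (nol : List Int) (k : Nat) (sub : List Int) :
    (nol.map (fun item => if k = (PySem.List.index? nol item).getD 0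
        then contribA nol (aOrderList nl) item sub else 0)).sum
      = contribB (bFirstIdx nol) (bPos nl) (bCnt nol) sub k := by
  match sub with
  | [] =>
      simp [contribA, contribB]
  | [s0] =>
      have hz : ∀ item, (if k = (PySem.List.index? nol item).getD 0
          then contribA nol (aOrderList nl) item [s0] else 0) = 0 := by
        intro item
        have hc : contribA nol (aOrderList nl) item [s0] = 0 := by
          unfold contribA
          by_cases hm : item ∈ [s0]
          · have he : item = s0 := by simpa using hm
            subst he
            simp
          · simp [hm]
        simp [hc]
      simp only [contribB]
      rw [List.map_congr_left (fun item _ => hz item)]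
      simp
  | s0 :: s1 :: t =>
      have hC : ∀ item, (if k = (PySem.List.index? nol item).getD 0
          then contribA nol (aOrderList nl) item (s0 :: s1 :: t) else 0)
          = (if item = s1 then
              (if s1 ≠ s0 ∧ k = (PySem.List.index? nol s1).getD 0 then
                (if s0 ∉ nol then 0
                 else ((PySem.List.index? (aOrderList nl) s0).getD 0 : Int) + 1)
               else 0)
             else 0) := by
        intro item
        rw [contribA_cons2]
        by_cases h1 : item = s1
        · subst h1
          by_cases hne : item = s0
          · simp [hne]
          · by_cases hk : k = (PySem.List.index? nol item).getD 0 <;> simp [hne, hk]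
        · simp [h1]
      rw [List.map_congr_left (fun item _ => hC item), sum_map_ite_eq, contribB_cons2]
      by_cases hmem : s1 ∈ nol
      · have hcont := (bFirstIdx_contains nol s1).2 hmem
        have hftB : (if (bFirstIdx nol).contains s0 then ((bPos nl).getD s0 0 : Int) + 1 else 0)
            = (if s0 ∉ nol then (0:Int)
               else ((PySem.List.index? (aOrderList nl) s0).getD 0 : Int) + 1) := by
          by_cases h0 : s0 ∈ nol
          · rw [if_pos ((bFirstIdx_contains nol s0).2 h0), if_neg (by simpa using h0), bPos_getD]
          · rw [if_neg (fun hc => h0 ((bFirstIdx_contains nol s0).1 hc)), if_pos h0]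
        by_cases hcond : s1 ≠ s0 ∧ k = (PySem.List.index? nol s1).getD 0
        · rw [if_pos hcond,
            if_pos (⟨hcond.1, hcont, by rw [bFirstIdx_getD]; exact hcond.2⟩ :
              s1 ≠ s0 ∧ (bFirstIdx nol).contains s1 = true ∧ k = (bFirstIdx nol).getD s1 0),
            hftB, bCnt_getD]
          ring
        · rw [if_neg hcond, if_neg (by
            rintro ⟨ha, -, hb⟩
            rw [bFirstIdx_getD] at hb
            exact hcond ⟨ha, hb⟩)]
          ring
      · have hcnt : nol.count s1 = 0 := List.count_eq_zero.2 hmem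
        have hcont : (bFirstIdx nol).contains s1 = false := by
          rw [← Bool.not_eq_true, bFirstIdx_contains]
          exact hmem
        rw [hcnt, if_neg (show ¬ (s1 ≠ s0 ∧ (bFirstIdx nol).contains s1 = true
          ∧ k = (bFirstIdx nol).getD s1 0) from fun h => Bool.false_ne_true (hcont ▸ h.2.1))]
        simp

theorem key_sum (nl : List (List Int)) (nol : List Int) (k : Nat) :
    (nol.map (fun item => if k = (PySem.List.index? nol item).getD 0
        then (nl.map (contribA nol (aOrderList nl) item)).sum else 0)).sum
      = (nl.map (fun sub => contribB (bFirstIdx nol) (bPos nl) (bCnt nol) sub k)).sum := by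
  have step1 : (nol.map (fun item => if k = (PySem.List.index? nol item).getD 0
        then (nl.map (contribA nol (aOrderList nl) item)).sum else 0)).sum
      = (nol.map (fun item => (nl.map (fun sub => if k = (PySem.List.index? nol item).getD 0
          then contribA nol (aOrderList nl) item sub else 0)).sum)).sum := by
    congr 1
    apply List.map_congr_left
    intro item _
    by_cases hc : k = (PySem.List.index? nol item).getD 0
    · rw [if_pos hc]
      congr 1
      apply List.map_congr_left
      intro sub _
      rw [if_pos hc]
    · rw [if_neg hc]
      have hzz : (nl.map (fun sub => if k = (PySem.List.index? nol item).getD 0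
          then contribA nol (aOrderList nl) item sub else 0)) = nl.map (fun _ => (0 : Int)) :=
        List.map_congr_left (fun sub _ => by rw [if_neg hc])
      rw [hzz]
      simp
  rw [step1, sum_map_swap]
  congr 1
  apply List.map_congr_left
  intro sub _
  exact per_sub nl nol k sub

theorem weights_eq (nl : List (List Int)) (nol : List Int) :
    (nol.foldl (fun ow item => nl.foldl (aInner nol (aOrderList nl) item) ow)
        (List.replicate nol.length 0))
      = nl.foldl (bStep (bFirstIdx nol) (bPos nl) (bCnt nol))
          (List.replicate nol.length 0) := by
  apply List.ext_getElem
  · rw [aOuter_length, bStep_length]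
  · intro k h1 h2
    rw [← List.getD_eq_getElem _ 0 h1, ← List.getD_eq_getElem _ 0 h2]
    rw [aOuter_foldl nol (aOrderList nl) nl nol _ (fun x hx => hx) (by simp)]
    rw [bStep_foldl _ _ _ nl _ k (by
      intro sl hsl
      rw [bFirstIdx_getD]
      simp only [List.length_replicate]
      exact index?_getD_lt nol sl ((bFirstIdx_contains nol sl).1 hsl))]
    rw [key_sum]

-- ===== VERDICT (by name: the statement is the Claim_ definition above) =====
theorem decide_eq_symm (a b : Int) : decide (a = b) = decide (b = a) := by
  by_cases h : a = b
  · simp [h]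
  · have h' : ¬ b = a := fun hh => h hh.symm
    simp [h, h']

theorem create_master_list_spec : Claim_equal_create_master_list := by
  intro nl nol _
  unfold Spec_create_master_list
  by_cases hnil : nol = []
  · subst hnil
    simp [create_master_list, create_master_list_alt]
  · unfold create_master_list create_master_list_alt
    rw [if_neg hnil]
    simp only []
    rw [weights_eq nl nol]
    rw [PySem.List.foldl_append_ite_eq_filter
      (fun elem => (PySem.List.min? (nl.foldl (bStep (bFirstIdx nol) (bPos nl) (bCnt nol))
          (List.replicate nol.length 0)) (fun x => x)).getD 0
        = (nl.foldl (bStep (bFirstIdx nol) (bPos nl) (bCnt nol))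
            (List.replicate nol.length 0)).getD
            ((PySem.List.index? nol elem).getD 0) 0) nol []]
    rw [List.nil_append]
    apply List.filter_congr
    intro e _
    rw [bFirstIdx_getD]
    exact decide_eq_symm _ _
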